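-- pv_equiv track=rewrite | github.com/nucleusbox/NucleusIQ | src/nucleusiq/core/tools/builtin/file_extract.py | _format_csv_table
-- ===== SOURCE A (Python) =====
-- def _format_csv_table(headers: list[str], rows: list[list[str]]) -> list[str]:
--     """Render a pretty-printed table for CSV/TSV sample output."""
--     col_widths = [len(h) for h in headers]
--     for row in rows:
--         for i, val in enumerate(row):
--             if i < len(col_widths):
--                 col_widths[i] = max(col_widths[i], len(val))
--
--     parts: list[str] = []
--     header_line = " | ".join(h.ljust(col_widths[i]) for i, h in enumerate(headers))
--     parts.append(f"  {header_line}")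
--     parts.append(f"  {'-+-'.join('-' * w for w in col_widths)}")
--     for row in rows:
--         padded = [
--             (row[i] if i < len(row) else "").ljust(
--                 col_widths[i] if i < len(col_widths) else 0
--             )
--             for i in range(len(headers))
--         ]
--         parts.append(f"  {' | '.join(padded)}")
--     return parts
-- ===== SOURCE B (Python) =====
-- def _format_csv_table(headers: list[str], rows: list[list[str]]) -> list[str]:
--     """Column-by-column accumulation: no width array and no per-row rendering pass —
--     a single loop over column indices materializes each column, computes its width on
--     the spot, and appends that column's padded cell to every output line's cell list
--     (header, separator and each body row grow in lockstep); lines are joined once."""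
--     head, sep = [], []
--     body = [[] for _ in rows]
--     for j in range(len(headers)):
--         col = [headers[j]] + [r[j] if j < len(r) else "" for r in rows]
--         w = max(map(len, col))
--         head.append(col[0].ljust(w))
--         sep.append("-" * w)
--         for b, c in zip(body, col[1:]):
--             b.append(c.ljust(w))
--     return ["  " + " | ".join(head), "  " + "-+-".join(sep)] + ["  " + " | ".join(b) for b in body]
-- ===== Notes on version B (the rewrite author's own statement) =====
-- stated objective: alternative
-- what changed: B abandons A's two-stage width-array-then-render design: it keeps no width list and has no per-row rendering pass, instead growing every output line (header, separator, each body row) in lockstep as a list of padded cells inside a single loop over column indices, materializing each column and computing its width on the spot, and joining each line once at the end.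
import Mathlib
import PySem

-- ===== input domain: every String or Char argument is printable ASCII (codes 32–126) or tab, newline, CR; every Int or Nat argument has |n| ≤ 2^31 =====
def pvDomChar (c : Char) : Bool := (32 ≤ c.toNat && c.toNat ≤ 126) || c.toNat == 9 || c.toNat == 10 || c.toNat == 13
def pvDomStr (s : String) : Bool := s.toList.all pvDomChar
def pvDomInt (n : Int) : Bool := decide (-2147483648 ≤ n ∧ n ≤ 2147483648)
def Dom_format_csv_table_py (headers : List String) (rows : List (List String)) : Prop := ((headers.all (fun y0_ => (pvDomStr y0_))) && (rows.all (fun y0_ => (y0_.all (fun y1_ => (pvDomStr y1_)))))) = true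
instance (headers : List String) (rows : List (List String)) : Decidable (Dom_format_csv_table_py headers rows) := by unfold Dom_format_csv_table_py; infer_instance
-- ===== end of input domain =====

-- B builds each output line column by column (no width array, no row-wise join); equal return value is proved below.

-- str.ljust(w) on code points (exact: pad with spaces on the right up to width w)
def pvLjust (cs : List Char) (w : Nat) : List Char := cs ++ List.replicate (w - cs.length) ' '

-- ===== PORT A =====
-- literal transliteration of _format_csv_table: row-wise running max of column widths, then render.
-- Python len(s) is ported as s.toList.length (exact, always ≥ 0).
def format_csv_table_py (headers : List String) (rows : List (List String)) : List String :=
  let colWidths0 := headers.map (fun h => h.toList.length)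
  let colWidths := rows.foldl (fun ws row =>
      (PySem.List.enumerate row).foldl (fun ws p =>
        if p.1 < (ws.length : Int) then ws.set p.1.toNat (max (ws.getD p.1.toNat 0) p.2.toList.length) else ws) ws)
    colWidths0
  let headerLine := PySem.Chars.join " | ".toList
      ((PySem.List.enumerate headers).map (fun p => pvLjust p.2.toList (colWidths.getD p.1.toNat 0)))
  let parts : List String := []
  let parts := parts ++ [String.mk ("  ".toList ++ headerLine)]
  let parts := parts ++ [String.mk ("  ".toList ++ PySem.Chars.join "-+-".toList (colWidths.map (fun w => List.replicate w '-')))]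
  let parts := rows.foldl (fun parts row =>
      parts ++ [String.mk ("  ".toList ++ PySem.Chars.join " | ".toList (
        (List.range headers.length).map (fun i =>
          pvLjust (if i < row.length then (row.getD i "").toList else "".toList)
                  (if i < colWidths.length then colWidths.getD i 0 else 0))))]) parts
  parts

-- ===== PORT B =====
-- transliteration of Source B's loop body (the body of `for j in range(len(headers))`):
-- state = (head, sep, body), each line a list of padded cells; column j is
-- materialized, its width computed on the spot, and its padded cell appended to every
-- line. Python's max(map(len, col)) on the nonempty col (header first) is
-- ported as the running max from 0 over the lengths, exact since lengths are >= 0.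
def pvBStep (headers : List String) (rows : List (List String))
    (st : List (List Char) × List (List Char) × List (List (List Char))) (j : Nat) :
    List (List Char) × List (List Char) × List (List (List Char)) :=
  let col := (headers.getD j "") :: rows.map (fun r => if j < r.length then r.getD j "" else "")
  let w := (col.map (fun c => c.toList.length)).foldl max 0
  (st.1 ++ [pvLjust (col.getD 0 "").toList w],
   st.2.1 ++ [List.replicate w '-'],
   (st.2.2.zip col.tail).map (fun p => p.1 ++ [pvLjust p.2.toList w]))

-- transliteration of Source B: head/sep/body start empty, the loop over
-- range(len(headers)) appends one padded cell to each line, and every line is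
-- joined once at the end with its indent.
def format_csv_table_py_alt (headers : List String) (rows : List (List String)) : List String :=
  let st := (List.range headers.length).foldl (pvBStep headers rows)
    ([], [], rows.map (fun _ => []))
  String.mk ("  ".toList ++ PySem.Chars.join " | ".toList st.1)
    :: String.mk ("  ".toList ++ PySem.Chars.join "-+-".toList st.2.1)
    :: st.2.2.map (fun b => String.mk ("  ".toList ++ PySem.Chars.join " | ".toList b))

-- ===== PRECONDITION & SPEC =====
def Spec_format_csv_table_py (headers : List String) (rows : List (List String)) (out : List String) : Prop := out = format_csv_table_py_alt headers rows
instance (headers : List String) (rows : List (List String)) (out : List String) : Decidable (Spec_format_csv_table_py headers rows out) := by unfold Spec_format_csv_table_py; infer_instance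

-- ===== CLAIM (what is proved, stated in full; the proofs are below) =====
def Claim_equal_format_csv_table_py : Prop := ∀ (headers : List String) (rows : List (List String)), Dom_format_csv_table_py headers rows → Spec_format_csv_table_py headers rows (format_csv_table_py headers rows)

-- ===== LEMMAS AND PROOFS =====

-- length of the cell at column j of a (possibly ragged) row, counting from start index s
def pvRlen (s j : Nat) (row : List String) : Nat :=
  if s ≤ j ∧ j - s < row.length then (row.getD (j - s) "").toList.length else 0

-- the width of column j: running max over rows starting from the header length
def pvW (headers : List String) (rows : List (List String)) (j : Nat) : Nat :=
  rows.foldl (fun m row => max m (pvRlen 0 j row)) (headers.getD j "").toList.length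

-- the reference width list (A's colWidths)
def pvRefW (headers : List String) (rows : List (List String)) : List Nat :=
  (List.range headers.length).map (pvW headers rows)

lemma pvRlen_cons (s j : Nat) (x : String) (xs : List String) :
    pvRlen s j (x :: xs) = max (if j = s then x.toList.length else 0) (pvRlen (s+1) j xs) := by
  unfold pvRlen
  by_cases h : j = s
  · subst h; simp
  · by_cases h2 : s ≤ j ∧ j - s < xs.length + 1
    · have hs : s + 1 ≤ j ∧ j - (s+1) < xs.length := by omega
      rw [if_pos (by simpa using h2), if_pos hs]
      have : j - s = (j - (s+1)) + 1 := by omega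
      simp [h, this]
    · have hs : ¬ (s + 1 ≤ j ∧ j - (s+1) < xs.length) := by omega
      rw [if_neg (by simpa using h2), if_neg hs]
      simp [h]

-- the inner enumerate-fold of A, pointwise
lemma pvInner_getElem? (row : List String) (s : Nat) (ws : List Nat) (j : Nat) :
    ((PySem.List.enumerate row (s : Int)).foldl (fun ws p =>
        if p.1 < (ws.length : Int) then ws.set p.1.toNat (max (ws.getD p.1.toNat 0) p.2.toList.length) else ws) ws)[j]?
      = ws[j]?.map (fun w => max w (pvRlen s j row)) := by
  induction row generalizing s ws with
  | nil =>
      have h0 : pvRlen s j ([] : List String) = 0 := by unfold pvRlen; simp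
      rw [PySem.List.enumerate_nil, List.foldl_nil, h0]
      cases h : ws[j]? <;> simp
  | cons x xs ih =>
      rw [PySem.List.enumerate_cons, List.foldl_cons]
      have hstep : ((s : Int) + 1) = ((s + 1 : Nat) : Int) := by push_cast; ring
      rw [hstep, ih]
      by_cases hs : (s : Int) < (ws.length : Int)
      · have hsn : s < ws.length := by exact_mod_cast hs
        rw [if_pos hs]
        simp [Int.toNat_natCast]
        rw [List.getElem?_set]
        by_cases hj : s = j
        · subst hj
          simp [hsn]
          rw [pvRlen_cons]
          simp
        · simp [hj]
          rw [pvRlen_cons]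
          cases h : ws[j]? with
          | none => simp
          | some w =>
              simp
              have : ¬ j = s := fun h' => hj h'.symm
              simp [this]
      · rw [if_neg hs]
        have hlen : ws.length ≤ s := by exact_mod_cast not_lt.mp hs
        cases h : ws[j]? with
        | none => simp
        | some w =>
            have hj : j < ws.length := (List.getElem?_eq_some_iff.mp h).1
            have h1 : pvRlen (s+1) j xs = 0 := by unfold pvRlen; rw [if_neg (by omega)]
            have h2 : pvRlen s j (x :: xs) = 0 := by unfold pvRlen; rw [if_neg (by omega)]
            simp [h1, h2]

-- the outer row fold of A, pointwise
lemma pvOuter_getElem? (rows : List (List String)) (ws : List Nat) (j : Nat) :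
    (rows.foldl (fun ws row =>
        (PySem.List.enumerate row).foldl (fun ws p =>
          if p.1 < (ws.length : Int) then ws.set p.1.toNat (max (ws.getD p.1.toNat 0) p.2.toList.length) else ws) ws) ws)[j]?
      = ws[j]?.map (fun w => rows.foldl (fun m row => max m (pvRlen 0 j row)) w) := by
  induction rows generalizing ws with
  | nil => rw [List.foldl_nil]; cases h : ws[j]? <;> simp
  | cons r rs ih =>
      rw [List.foldl_cons, ih]
      have h0 : PySem.List.enumerate r = PySem.List.enumerate r ((0 : Nat) : Int) := by norm_num
      rw [h0, pvInner_getElem? r 0 ws j]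
      cases h : ws[j]? <;> simp

-- A's computed widths are the reference widths
lemma pvWidthsA_eq (headers : List String) (rows : List (List String)) :
    rows.foldl (fun ws row =>
        (PySem.List.enumerate row).foldl (fun ws p =>
          if p.1 < (ws.length : Int) then ws.set p.1.toNat (max (ws.getD p.1.toNat 0) p.2.toList.length) else ws) ws)
      (headers.map (fun h => h.toList.length)) = pvRefW headers rows := by
  apply List.ext_getElem?
  intro j
  rw [pvOuter_getElem?]
  unfold pvRefW pvW
  by_cases hj : j < headers.length
  · rw [List.getElem?_map, List.getElem?_eq_getElem hj]
    rw [List.getElem?_map, List.getElem?_range hj]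
    simp [List.getD_eq_getElem?_getD, List.getElem?_eq_getElem hj]
  · rw [List.getElem?_map, List.getElem?_eq_none (by simpa using hj)]
    rw [List.getElem?_map, List.getElem?_eq_none (by simpa using hj)]
    simp

-- fold-append is map
lemma pvFoldAppend {α β : Type} (xs : List α) (g : α → β) (init : List β) :
    xs.foldl (fun acc x => acc ++ [g x]) init = init ++ xs.map g := by
  induction xs generalizing init with
  | nil => simp
  | cons x xs ih => simp [ih]

lemma pvRefW_length (headers : List String) (rows : List (List String)) :
    (pvRefW headers rows).length = headers.length := by
  unfold pvRefW; simp

lemma pvRefW_getD (headers : List String) (rows : List (List String)) (j : Nat) (hj : j < headers.length) :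
    (pvRefW headers rows)[j]?.getD 0 = pvW headers rows j := by
  unfold pvRefW
  rw [List.getElem?_map, List.getElem?_range hj]
  simp

lemma pvRefW_getElem (headers : List String) (rows : List (List String)) (j : Nat)
    (hj : j < (pvRefW headers rows).length) :
    (pvRefW headers rows)[j] = pvW headers rows j := by
  unfold pvRefW at *
  simp at hj
  simp [List.getElem_map, List.getElem_range]

-- cell length equals pvRlen
lemma pvCellLen (j : Nat) (r : List String) :
    (if j < r.length then r.getD j "" else "").toList.length = pvRlen 0 j r := by
  unfold pvRlen
  by_cases h : j < r.length <;> simp [h]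

-- the width computed inside pvBStep is pvW
lemma pvBStep_w (headers : List String) (rows : List (List String)) (j : Nat) :
    (((headers.getD j "") :: rows.map (fun r => if j < r.length then r.getD j "" else "")).map
        (fun c => c.toList.length)).foldl max 0 = pvW headers rows j := by
  unfold pvW
  rw [List.map_cons, List.foldl_cons, List.map_map, List.foldl_map]
  have h0 : max 0 (headers.getD j "").toList.length = (headers.getD j "").toList.length := by omega
  rw [h0]
  apply PySem.List.foldl_congr_mem
  intro m r _
  simp only [Function.comp]
  rw [pvCellLen]

-- B's fold invariant: after the columns 0..m-1 every line is its padded-cell list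
lemma pvBfold_eq (headers : List String) (rows : List (List String)) (m : Nat) :
    (List.range m).foldl (pvBStep headers rows) ([], [], rows.map (fun _ => []))
    = ((List.range m).map (fun j => pvLjust (headers.getD j "").toList (pvW headers rows j)),
       (List.range m).map (fun j => List.replicate (pvW headers rows j) '-'),
       rows.map (fun row => (List.range m).map (fun j =>
          pvLjust (if j < row.length then (row.getD j "") else "").toList (pvW headers rows j)))) := by
  induction m with
  | zero => simp
  | succ m ih =>
      rw [List.range_succ, List.foldl_append, ih, List.foldl_cons, List.foldl_nil]
      unfold pvBStep
      simp only []
      rw [pvBStep_w]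
      congr 1
      · simp
      congr 1
      · simp
      · rw [List.tail_cons, List.zip_map']
        rw [List.map_map]
        apply List.map_congr_left
        intro row _
        simp [Function.comp]

-- A's header cells as a range-map
lemma pvHeaderCells (headers : List String) (rows : List (List String)) :
    (PySem.List.enumerate headers).map (fun p => pvLjust p.2.toList ((pvRefW headers rows).getD p.1.toNat 0))
      = (List.range headers.length).map (fun j => pvLjust (headers.getD j "").toList (pvW headers rows j)) := by
  apply List.ext_getElem?
  intro k
  rw [List.getElem?_map, List.getElem?_map]
  have h0 : PySem.List.enumerate headers = PySem.List.enumerate headers ((0:Nat) : Int) := by norm_num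
  rw [h0, PySem.List.getElem?_enumerate]
  by_cases hk : k < headers.length
  · rw [List.getElem?_eq_getElem hk, List.getElem?_range hk]
    simp only [Option.map_some, Option.some.injEq]
    rw [show (headers[k] : String) = headers.getD k "" from by
      simp [List.getD_eq_getElem?_getD, List.getElem?_eq_getElem hk]]
    simp [Int.toNat_natCast, pvRefW_getD headers rows k hk]
  · rw [List.getElem?_eq_none (by simpa using hk), List.getElem?_eq_none (by simpa using hk)]
    simp

-- A's separator cells as a range-map
lemma pvSepCells (headers : List String) (rows : List (List String)) :
    (pvRefW headers rows).map (fun w => List.replicate w '-')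
      = (List.range headers.length).map (fun j => List.replicate (pvW headers rows j) '-') := by
  unfold pvRefW
  rw [List.map_map]
  rfl

-- A's row cells as the canonical range-map
lemma pvRowCells (headers : List String) (rows : List (List String)) (row : List String) :
    (List.range headers.length).map (fun i =>
        pvLjust (if i < row.length then (row.getD i "").toList else "".toList)
                (if i < (pvRefW headers rows).length then (pvRefW headers rows).getD i 0 else 0))
      = (List.range headers.length).map (fun j =>
        pvLjust (if j < row.length then (row.getD j "") else "").toList (pvW headers rows j)) := by
  apply List.map_congr_left
  intro j hj
  rw [List.mem_range] at hj
  have hlen := pvRefW_length headers rows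
  by_cases hr : j < row.length <;>
    simp [hr, hlen, hj, List.getD_eq_getElem?_getD, pvRefW_getElem]

-- ===== VERDICT (by name: the statement is the Claim_ definition above) =====
theorem format_csv_table_py_spec : Claim_equal_format_csv_table_py := by
  intro headers rows _
  unfold Spec_format_csv_table_py format_csv_table_py format_csv_table_py_alt
  simp only []
  rw [pvWidthsA_eq, pvFoldAppend, pvBfold_eq]
  rw [pvHeaderCells, pvSepCells]
  simp only [List.nil_append, List.cons_append, List.map_map]
  congr 1
  congr 1
  apply List.map_congr_left
  intro row _
  simp only [Function.comp]
  rw [pvRowCells]
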